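-- pv_equiv track=rewrite | github.com/SSH1007/Algorithm | 프로그래머스/unrated/181874. A 강조하기/A 강조하기.py | solution
-- ===== SOURCE A (Python) =====
-- def solution(myString):
--     answer = ''
--     for m in myString:
--         if m == 'a':
--             answer += m.upper()
--         elif m == 'A':
--             answer += 'A'
--         else:
--             answer += m.lower()
--     return answer
-- ===== SOURCE B (Python) =====
-- def solution(myString):
--     return myString.lower().replace('a', 'A')
-- ===== Notes on version B (the rewrite author's own statement) =====
-- stated objective: idiomatic
-- what changed: Replaces the per-character loop with three-way branching by the closed form lower()-then-replace: one whole-string lowering pass followed by one whole-string replace pass.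
import Mathlib
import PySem

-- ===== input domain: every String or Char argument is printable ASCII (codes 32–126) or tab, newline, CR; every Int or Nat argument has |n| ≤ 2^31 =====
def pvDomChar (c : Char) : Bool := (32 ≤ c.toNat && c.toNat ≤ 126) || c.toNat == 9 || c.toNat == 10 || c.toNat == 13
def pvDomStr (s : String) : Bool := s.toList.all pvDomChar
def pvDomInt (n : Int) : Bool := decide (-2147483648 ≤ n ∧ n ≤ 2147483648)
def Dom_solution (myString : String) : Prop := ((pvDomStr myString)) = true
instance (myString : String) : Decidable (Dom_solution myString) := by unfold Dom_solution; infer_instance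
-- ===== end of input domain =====

-- B replaces A's per-character loop with the closed form myString.lower().replace('a','A') (idiomatic, two library passes).


-- ===== PORT A =====
def solution (myString : String) : String :=
  myString.toList.foldl
    (fun answer m =>
      if m = 'a' then answer ++ String.ofList [PySem.Chars.upperChar m]
      else if m = 'A' then answer ++ "A"
      else answer ++ String.ofList [PySem.Chars.lowerChar m])
    ""

-- ===== PORT B =====
def solution_alt (myString : String) : String :=
  PySem.Str.replace (PySem.Str.lower myString) "a" "A"

-- ===== PRECONDITION & SPEC =====
def Spec_solution (myString : String) (out : String) : Prop := out = solution_alt myString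
instance (myString : String) (out : String) : Decidable (Spec_solution myString out) := by unfold Spec_solution; infer_instance

-- ===== CLAIM (what is proved, stated in full; the proofs are below) =====
def Claim_equal_solution : Prop := ∀ (myString : String), Dom_solution myString → Spec_solution myString (solution myString)

-- ===== LEMMAS AND PROOFS =====

-- A's per-char transform, as a function on Char
def pvF (c : Char) : Char :=
  if c = 'a' then PySem.Chars.upperChar c
  else if c = 'A' then 'A'
  else PySem.Chars.lowerChar c

theorem pvA_toList (l : List Char) (a : String) :
    (l.foldl
      (fun answer m =>
        if m = 'a' then answer ++ String.ofList [PySem.Chars.upperChar m]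
        else if m = 'A' then answer ++ "A"
        else answer ++ String.ofList [PySem.Chars.lowerChar m]) a).toList
      = a.toList ++ l.map pvF := by
  induction l generalizing a with
  | nil => simp
  | cons c t ih =>
    simp only [List.foldl_cons, List.map_cons, pvF]
    by_cases h1 : c = 'a'
    · simp [h1, ih]
    · by_cases h2 : c = 'A'
      · simp [h2, ih]
      · simp [h1, h2, ih]

-- replace with the single-char pattern ['a'] is a map
theorem pvGo (fuel : Nat) (l acc : List Char) (h : l.length ≤ fuel) :
    PySem.Chars.replace.go ['a'] ['A'] fuel l acc
      = acc.reverse ++ l.map (fun c => if c = 'a' then 'A' else c) := by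
  induction fuel generalizing l acc with
  | zero =>
    have hl : l = [] := List.length_eq_zero_iff.mp (Nat.le_zero.mp h)
    simp [hl, PySem.Chars.replace.go]
  | succ n ih =>
    cases l with
    | nil => simp [PySem.Chars.replace.go]
    | cons c t =>
      rw [PySem.Chars.replace.go]
      by_cases hc : c = 'a'
      · have hp : List.isPrefixOf ['a'] (c :: t) = true := by simp [List.isPrefixOf, hc]
        simp only [hc]
        rw [ih]
        · simp
        · simpa using Nat.lt_succ_iff.mp (by simpa using h)
      · have hp : List.isPrefixOf ['a'] (c :: t) = false := by
          simp [List.isPrefixOf]; exact fun h' => (hc h'.symm).elim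
        simp only [hp, Bool.false_eq_true, ite_false]
        rw [ih]
        · simp [hc]
        · simpa using Nat.lt_succ_iff.mp (by simpa using h)

theorem pvReplace (l : List Char) :
    PySem.Chars.replace l ['a'] ['A'] = l.map (fun c => if c = 'a' then 'A' else c) := by
  rw [PySem.Chars.replace]
  rw [if_neg (by decide)]
  rw [pvGo l.length l [] le_rfl]
  simp

theorem pvLowerChar_eq_a {c : Char} (h : PySem.Chars.lowerChar c = 'a') : c = 'a' ∨ c = 'A' := by
  unfold PySem.Chars.lowerChar at h
  by_cases hu : PySem.Chars.isupper c = true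
  · rw [if_pos hu] at h
    simp only [PySem.Chars.isupper, Bool.and_eq_true, decide_eq_true_eq, Char.le_def,
      UInt32.le_iff_toNat_le] at hu
    have h1 : 65 ≤ c.toNat := hu.1
    have h2 : c.toNat ≤ 90 := hu.2
    interval_cases hc : c.toNat <;>
      first
        | (exact absurd h (by decide))
        | (right
           have hv : c.val.toNat = (('A' : Char)).val.toNat := hc
           exact Char.ext (UInt32.toNat_inj.mp hv))
  · rw [if_neg hu] at h
    exact Or.inl h

theorem pvPointwise (c : Char) :
    (if PySem.Chars.lowerChar c = 'a' then 'A' else PySem.Chars.lowerChar c) = pvF c := by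
  unfold pvF
  by_cases h1 : c = 'a'
  · subst h1; decide
  · by_cases h2 : c = 'A'
    · subst h2; decide
    · rw [if_neg h1, if_neg h2, if_neg]
      intro h
      rcases pvLowerChar_eq_a h with h | h
      · exact h1 h
      · exact h2 h

-- ===== VERDICT (by name: the statement is the Claim_ definition above) =====
theorem solution_spec : Claim_equal_solution := by
  intro s _
  unfold Spec_solution solution solution_alt
  apply String.ext
  show _ = (PySem.Str.replace (PySem.Str.lower s) "a" "A").toList
  rw [pvA_toList]
  simp only [PySem.Str.toList_replace, PySem.Str.toList_lower]
  show s.toList.map pvF = PySem.Chars.replace (PySem.Chars.lower s.toList) "a".toList "A".toList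
  have ha : ("a" : String).toList = ['a'] := rfl
  have hA : ("A" : String).toList = ['A'] := rfl
  rw [ha, hA, pvReplace]
  unfold PySem.Chars.lower
  rw [List.map_map]
  apply List.map_congr_left
  intro c _
  exact (pvPointwise c).symm
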